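-- pv_equiv track=rewrite | github.com/alexandre-mazel/electronoos | alex_pytools/stringmatch.py | getFirstWord
-- ===== SOURCE A (Python) =====
-- def getPunctuationChars():
--     return " .,;:?!"
--
-- def getFirstWord( s, bAddStarAsSeparator = False ):
--     """
--     return the first  word in s
--     return "" if word start with a space or ...
--     """
--     sep = getPunctuationChars()
--     if bAddStarAsSeparator:
--         sep += '*'
--     for i,c in enumerate(s):
--         if c in sep:
--             break
--     else:
--         return s
--     return s[:i]
-- ===== SOURCE B (Python) =====
-- def getPunctuationChars():
--     return " .,;:?!"
--
-- def getFirstWord(s, bAddStarAsSeparator=False):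
--     sep = getPunctuationChars()
--     if bAddStarAsSeparator:
--         sep += '*'
--     positions = [p for c in sep for p in (s.find(c),) if p != -1]
--     if not positions:
--         return s
--     return s[:min(positions)]
-- ===== Notes on version B (the rewrite author's own statement) =====
-- stated objective: faster
-- what changed: Instead of scanning s character-by-character for the first separator, B runs one s.find per separator character and cuts s at the minimum of the found positions (full s if none found).
import Mathlib
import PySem

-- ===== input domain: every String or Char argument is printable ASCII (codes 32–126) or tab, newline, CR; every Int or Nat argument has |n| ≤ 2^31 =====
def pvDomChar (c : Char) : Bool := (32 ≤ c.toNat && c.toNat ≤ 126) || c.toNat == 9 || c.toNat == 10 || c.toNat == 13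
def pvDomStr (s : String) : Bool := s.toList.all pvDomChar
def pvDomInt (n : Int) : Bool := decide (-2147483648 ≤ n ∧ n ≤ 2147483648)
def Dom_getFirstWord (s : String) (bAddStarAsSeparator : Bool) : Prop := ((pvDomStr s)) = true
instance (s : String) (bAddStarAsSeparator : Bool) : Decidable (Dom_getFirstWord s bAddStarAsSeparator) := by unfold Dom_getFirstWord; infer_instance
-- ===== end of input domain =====

-- B replaces A's single character-by-character scan of s by one s.find per separator
-- character and a min over the found positions (objective: alternative decomposition).

-- ===== PORT A =====
-- shared helper: Python getPunctuationChars() plus the optional '*' (both sources build sep this way)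
def pvSep (bAddStarAsSeparator : Bool) : List Char :=
  if bAddStarAsSeparator then " .,;:?!".toList ++ ['*'] else " .,;:?!".toList

-- the 'for i,c in enumerate(s): if c in sep: break / else: return s' loop; break returns s[:i]
def pvLoopA (s : String) (sep : List Char) : List (Int × Char) → String
  | [] => s
  | (i, c) :: rest =>
      if sep.contains c then PySem.Str.slice s none (some i)
      else pvLoopA s sep rest

def getFirstWord (s : String) (bAddStarAsSeparator : Bool) : String :=
  pvLoopA s (pvSep bAddStarAsSeparator) (PySem.List.enumerate s.toList 0)

-- ===== PORT B =====
def getFirstWord_alt (s : String) (bAddStarAsSeparator : Bool) : String :=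
  let sep := pvSep bAddStarAsSeparator
  let positions := sep.filterMap (fun c =>
    let p := PySem.Chars.find s.toList [c]
    if p = -1 then none else some p)
  match PySem.List.min? positions (fun x => x) with
  | none => s
  | some m => PySem.Str.slice s none (some m)

-- ===== PRECONDITION & SPEC =====
def Spec_getFirstWord (s : String) (bAddStarAsSeparator : Bool) (out : String) : Prop := out = getFirstWord_alt s bAddStarAsSeparator
instance (s : String) (bAddStarAsSeparator : Bool) (out : String) : Decidable (Spec_getFirstWord s bAddStarAsSeparator out) := by unfold Spec_getFirstWord; infer_instance

-- ===== CLAIM (what is proved, stated in full; the proofs are below) =====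
def Claim_equal_getFirstWord : Prop := ∀ (s : String) (bAddStarAsSeparator : Bool), Dom_getFirstWord s bAddStarAsSeparator → Spec_getFirstWord s bAddStarAsSeparator (getFirstWord s bAddStarAsSeparator)

-- ===== LEMMAS AND PROOFS =====

-- first index in l holding a character of sep (proof-side characterisation)
def fIdx (sep : List Char) : List Char → Option Nat
  | [] => none
  | c :: t => if sep.contains c then some 0 else (fIdx sep t).map (· + 1)

theorem fIdx_none_iff (sep : List Char) : ∀ (l : List Char),
    fIdx sep l = none ↔ ∀ (i : Nat) (c : Char), l[i]? = some c → sep.contains c = false := by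
  intro l
  induction l with
  | nil => simp [fIdx]
  | cons c t ih =>
    cases h : sep.contains c with
    | true =>
      simp only [fIdx, h, if_true]
      constructor
      · intro hn; cases hn
      · intro hall
        have := hall 0 c (by simp)
        rw [h] at this; cases this
    | false =>
      simp only [fIdx, h, Bool.false_eq_true, if_false, Option.map_eq_none_iff, ih]
      constructor
      · intro hall i cc hcc
        cases i with
        | zero => simp at hcc; subst hcc; exact h
        | succ k => exact hall k cc (by simpa using hcc)
      · intro hall k cc hcc
        exact hall (k + 1) cc (by simpa using hcc)

theorem fIdx_some (sep : List Char) : ∀ (l : List Char) (j : Nat),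
    fIdx sep l = some j →
      (∃ c, l[j]? = some c ∧ sep.contains c = true) ∧
      (∀ (i : Nat), i < j → ∀ c, l[i]? = some c → sep.contains c = false) := by
  intro l
  induction l with
  | nil => intro j h; cases h
  | cons c t ih =>
    intro j h
    cases hc : sep.contains c with
    | true =>
      simp only [fIdx, hc, if_true, Option.some_inj] at h
      subst h
      exact ⟨⟨c, by simp, hc⟩, fun i hi => by omega⟩
    | false =>
      simp only [fIdx, hc, Bool.false_eq_true, if_false, Option.map_eq_some_iff] at h
      obtain ⟨k, hk, rfl⟩ := h
      obtain ⟨⟨cc, hcc, hsep⟩, hmin⟩ := ih k hk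
      refine ⟨⟨cc, by simpa using hcc, hsep⟩, ?_⟩
      intro i hi cx hcx
      cases i with
      | zero => simp at hcx; subst hcx; exact hc
      | succ m => exact hmin m (by omega) cx (by simpa using hcx)

theorem singleton_prefix_iff' (c : Char) (l : List Char) : [c] <+: l ↔ l[0]? = some c := by
  cases l with
  | nil => simp
  | cons a t => simp [List.cons_prefix_cons, eq_comm]

-- A's loop over enumerate computes fIdx
theorem loopA_char (s : String) (sep : List Char) : ∀ (l : List Char) (n : Nat),
    pvLoopA s sep (PySem.List.enumerate l (n : Int)) =
      match fIdx sep l with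
      | none => s
      | some j => PySem.Str.slice s none (some ((n + j : Nat) : Int)) := by
  intro l
  induction l with
  | nil => intro n; simp [PySem.List.enumerate_nil, pvLoopA, fIdx]
  | cons c t ih =>
    intro n
    rw [PySem.List.enumerate_cons]
    cases hc : sep.contains c with
    | true =>
      have hm : c ∈ sep := by rw [← List.contains_iff_mem]; exact hc
      simp [pvLoopA, fIdx, hc, hm]
    | false =>
      simp only [pvLoopA, fIdx, hc, Bool.false_eq_true, if_false]
      have hcast : ((n : Int) + 1) = ((n + 1 : Nat) : Int) := by push_cast; ring
      rw [hcast, ih (n + 1)]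
      cases h : fIdx sep t with
      | none => simp
      | some j =>
        simp only [Option.map_some]
        have : (n + 1 + j : Nat) = (n + (j + 1) : Nat) := by omega
        rw [this]

-- facts about s.find(c) for a single character
theorem find_single_ne_neg_one {cs : List Char} {c : Char} (h : c ∈ cs) :
    PySem.Chars.find cs [c] ≠ -1 := by
  intro hh
  rw [PySem.Chars.find_eq_neg_one_iff] at hh
  exact hh ((List.singleton_infix_iff c cs).mpr h)

theorem find_single_eq_neg_one {cs : List Char} {c : Char} (h : c ∉ cs) :
    PySem.Chars.find cs [c] = -1 := by
  rw [PySem.Chars.find_eq_neg_one_iff]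
  simp [List.singleton_infix_iff, h]

theorem find_spec {cs sub : List Char} (h : PySem.Chars.find cs sub ≠ -1) :
    0 ≤ PySem.Chars.find cs sub ∧ sub <+: cs.drop (PySem.Chars.find cs sub).toNat ∧
      ∀ i : Nat, i < (PySem.Chars.find cs sub).toNat → ¬ sub <+: cs.drop i := by
  have h0 : (0 : Nat) ≤ cs.length := Nat.zero_le _
  have := PySem.Chars.findFrom_natCast_spec cs sub 0 h0
  simp only [Nat.cast_zero, PySem.Chars.findFrom_zero] at this
  obtain ⟨h1, h2, h3⟩ := this h
  exact ⟨by exact_mod_cast h1, h2, fun i hi => h3 i (by exact_mod_cast Int.natCast_nonneg i) hi⟩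

theorem find_single_getElem {cs : List Char} {c : Char} (h : PySem.Chars.find cs [c] ≠ -1) :
    cs[(PySem.Chars.find cs [c]).toNat]? = some c ∧
      ∀ i : Nat, i < (PySem.Chars.find cs [c]).toNat → cs[i]? ≠ some c := by
  obtain ⟨h0, h1, h2⟩ := find_spec h
  rw [singleton_prefix_iff', ← List.head?_eq_getElem?, List.head?_drop] at h1
  refine ⟨h1, fun i hi hc => ?_⟩
  exact h2 i hi (by rw [singleton_prefix_iff', ← List.head?_eq_getElem?, List.head?_drop]; exact hc)

-- the main equivalence on one input
theorem getFirstWord_eq (s : String) (b : Bool) : getFirstWord s b = getFirstWord_alt s b := by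
  unfold getFirstWord getFirstWord_alt
  set sep := pvSep b with hsep
  set cs := s.toList with hcs
  set f : Char → Option Int := fun c =>
    let p := PySem.Chars.find cs [c]
    if p = -1 then none else some p with hf
  have h0 : (0 : Int) = ((0 : Nat) : Int) := by norm_num
  rw [h0, loopA_char s sep cs 0]
  cases hidx : fIdx sep cs with
  | none =>
    -- no separator occurs in s: positions is empty
    have hnone : ∀ c ∈ sep, f c = none := by
      intro c hc
      have : c ∉ cs := by
        intro hmem
        obtain ⟨i, hi⟩ := List.mem_iff_getElem?.mp hmem
        have := (fIdx_none_iff sep cs).mp hidx i c hi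
        rw [← List.contains_iff_mem] at hc
        rw [this] at hc; cases hc
      simp only [hf]
      simp [find_single_eq_neg_one this]
    have hnil : sep.filterMap f = [] := List.filterMap_eq_nil_iff.mpr hnone
    have hm : PySem.List.min? ([] : List Int) (fun x => x) = none := by
      rw [PySem.List.min?_eq_none_iff]
    simp only [hnil, hm]
  | some j =>
    obtain ⟨⟨cj, hcj, hcjsep⟩, hmin⟩ := fIdx_some sep cs j hidx
    -- (j : Int) is one of the positions
    have hcjmem : cj ∈ cs := List.mem_iff_getElem?.mpr ⟨j, hcj⟩
    have hne : PySem.Chars.find cs [cj] ≠ -1 := find_single_ne_neg_one hcjmem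
    obtain ⟨hg, hlt⟩ := find_single_getElem hne
    have hge0 : 0 ≤ PySem.Chars.find cs [cj] := (find_spec hne).1
    have hfj : PySem.Chars.find cs [cj] = (j : Int) := by
      have h1 : ¬ j < (PySem.Chars.find cs [cj]).toNat := fun hlt' => hlt j hlt' hcj
      have h2 : ¬ (PySem.Chars.find cs [cj]).toNat < j := by
        intro hlt'
        have := hmin _ hlt' cj hg
        rw [this] at hcjsep; cases hcjsep
      omega
    have hjmem : (j : Int) ∈ sep.filterMap f := by
      refine List.mem_filterMap.mpr ⟨cj, ?_, ?_⟩
      · rw [← List.contains_iff_mem]; exact hcjsep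
      · simp only [hf]; simp [hne, hfj]
    -- every position is ≥ j
    have hall : ∀ p ∈ sep.filterMap f, (j : Int) ≤ p := by
      intro p hp
      obtain ⟨c, hcsep, hfc⟩ := List.mem_filterMap.mp hp
      simp only [hf] at hfc
      by_cases hne' : PySem.Chars.find cs [c] = -1
      · simp [hne'] at hfc
      · simp only [hne', if_false, Option.some_inj] at hfc
        subst hfc
        obtain ⟨hg', hlt'⟩ := find_single_getElem hne'
        have hge0' : 0 ≤ PySem.Chars.find cs [c] := (find_spec hne').1
        have : ¬ (PySem.Chars.find cs [c]).toNat < j := by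
          intro hlt''
          have hfalse := hmin _ hlt'' c hg'
          rw [← List.contains_iff_mem] at hcsep
          rw [hfalse] at hcsep; cases hcsep
        omega
    -- so min? of positions is exactly j
    cases hm : PySem.List.min? (sep.filterMap f) (fun x => x) with
    | none =>
      rw [PySem.List.min?_eq_none_iff] at hm
      rw [hm] at hjmem
      cases hjmem
    | some m =>
      have hmmem := PySem.List.min?_mem hm
      have hmle := PySem.List.min?_isMin hm (j : Int) hjmem
      have hjle := hall m hmmem
      have : m = (j : Int) := le_antisymm hmle hjle
      subst this
      simp [hm]

-- ===== VERDICT (by name: the statement is the Claim_ definition above) =====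
theorem getFirstWord_spec : Claim_equal_getFirstWord := by
  intro s b _
  unfold Spec_getFirstWord
  exact getFirstWord_eq s b
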